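-- pv_equiv track=rewrite | github.com/kftlfd/leetcode | 2024/10/989-2491-DividePlayersIntoTeamsOfEqualSize.py | dividePlayers
-- ===== SOURCE A (Python) =====
-- from typing import Counter, List
--
-- def dividePlayers(skill: List[int]) -> int:
--     n = len(skill)
--     total_skill = sum(skill)
--
--     # Check if total skill can be evenly distributed
--     if total_skill % (n // 2) != 0:
--         return -1
--
--     target_skill = total_skill // (n // 2)
--     skill_map = Counter(skill)
--     total_chemistry = 0
--
--     # Iterate through unique skill values
--     for curr_skill, curr_freq in skill_map.items():
--         partner_skill = target_skill - curr_skill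
--
--         # Check if valid partner skill exists with matching frequency
--         if (
--             partner_skill not in skill_map
--             or curr_freq != skill_map[partner_skill]
--         ):
--             return -1
--
--         # Calculate chemistry for all pairs with this skill
--         total_chemistry += curr_skill * partner_skill * curr_freq
--
--     # Return half of total chemistry (as each pair is counted twice)
--     return total_chemistry // 2
-- ===== SOURCE B (Python) =====
-- def dividePlayers(skill):
--     n = len(skill)
--     total = sum(skill)
--     if total % (n // 2) != 0:
--         return -1
--     target = total // (n // 2)
--     s = sorted(skill)
--     ans = 0
--     for i in range(n):
--         x = s[i]
--         y = s[n - 1 - i]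
--         if x + y != target:
--             return -1
--         ans += x * y
--     return ans // 2
-- ===== Notes on version B (the rewrite author's own statement) =====
-- stated objective: alternative
-- what changed: Replaces the Counter partner-frequency check over unique values by sorting the list and pairing each element with its mirror position (skill[i] with skill[n-1-i]), accumulating products over indices.
import Mathlib
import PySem

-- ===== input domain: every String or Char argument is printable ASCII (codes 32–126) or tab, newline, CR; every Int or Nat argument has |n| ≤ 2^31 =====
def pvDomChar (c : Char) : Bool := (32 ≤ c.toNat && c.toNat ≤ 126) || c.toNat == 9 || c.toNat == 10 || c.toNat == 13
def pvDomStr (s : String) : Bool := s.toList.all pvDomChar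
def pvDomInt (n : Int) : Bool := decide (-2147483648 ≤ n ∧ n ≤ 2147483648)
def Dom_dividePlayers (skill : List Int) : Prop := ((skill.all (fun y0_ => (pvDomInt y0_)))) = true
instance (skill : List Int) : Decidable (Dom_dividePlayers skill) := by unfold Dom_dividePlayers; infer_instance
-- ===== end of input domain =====

-- B replaces A's Counter/frequency check by sort + mirror-position pairing (alternative algorithm, same result).

-- ===== PORT A =====
-- the 'for curr_skill, curr_freq in skill_map.items()' loop with its early 'return -1' (none = early return)
def pvLoopA (m : PySem.Dict Int Int) (t : Int) : List (Int × Int) → Int → Option Int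
  | [], acc => some acc
  | (v, f) :: rest, acc =>
    let p := t - v
    if m.contains p = false ∨ f ≠ m.getD p 0 then none
    else pvLoopA m t rest (acc + v * p * f)

def dividePlayers (skill : List Int) : Int :=
  let n := skill.length
  let total := skill.sum
  if PySem.Int.mod total ((n / 2 : Nat) : Int) ≠ 0 then -1
  else
    let t := PySem.Int.floordiv total ((n / 2 : Nat) : Int)
    let m := PySem.Dict.counter skill
    match pvLoopA m t m.items 0 with
    | none => -1
    | some c => PySem.Int.floordiv c 2

-- ===== PORT B =====
-- the 'for i in range(n)' loop with its early 'return -1' (none = early return / IndexError guard)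
def pvLoopB (s : List Int) (n : Int) (t : Int) : List Int → Int → Option Int
  | [], acc => some acc
  | i :: rest, acc =>
    match PySem.List.pyGet? s i, PySem.List.pyGet? s (n - 1 - i) with
    | some x, some y => if x + y ≠ t then none else pvLoopB s n t rest (acc + x * y)
    | _, _ => none

def dividePlayers_alt (skill : List Int) : Int :=
  let n := skill.length
  let total := skill.sum
  if PySem.Int.mod total ((n / 2 : Nat) : Int) ≠ 0 then -1
  else
    let t := PySem.Int.floordiv total ((n / 2 : Nat) : Int)
    let s := PySem.List.sorted skill (fun x => x) false
    match pvLoopB s (n : Int) t (PySem.List.pyRange 0 (n : Int) 1) 0 with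
    | none => -1
    | some c => PySem.Int.floordiv c 2

-- ===== PRECONDITION & SPEC =====
-- Pre_ excludes lists of length < 2, on which both Pythons raise ZeroDivisionError (n // 2 = 0).
def Pre_dividePlayers (skill : List Int) : Prop := 2 ≤ skill.length
instance (skill : List Int) : Decidable (Pre_dividePlayers skill) := by unfold Pre_dividePlayers; infer_instance
def pvWitness_dividePlayers : List Int := [3, 2, 5, 1, 3, 4]

def Spec_dividePlayers (skill : List Int) (out : Int) : Prop := out = dividePlayers_alt skill
instance (skill : List Int) (out : Int) : Decidable (Spec_dividePlayers skill out) := by unfold Spec_dividePlayers; infer_instance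

-- ===== CLAIM (what is proved, stated in full; the proofs are below) =====
def Claim_equal_dividePlayers : Prop := ∀ (skill : List Int), Dom_dividePlayers skill → Pre_dividePlayers skill → Spec_dividePlayers skill (dividePlayers skill)

-- ===== LEMMAS AND PROOFS =====

-- abbreviations used only by the proofs
def pvCond (skill : List Int) (t : Int) : Prop :=
  ∀ v ∈ skill, List.count (t - v) skill = List.count v skill

def pvSym (s : List Int) (t : Int) : Prop :=
  ∀ j : Nat, j < s.length → s.getD j 0 + s.getD (s.length - 1 - j) 0 = t

def pvFailA (m : PySem.Dict Int Int) (t : Int) (p : Int × Int) : Prop :=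
  m.contains (t - p.1) = false ∨ p.2 ≠ m.getD (t - p.1) 0

-- A's loop returns none iff some item fails its check
lemma pvLoopA_none_iff (m : PySem.Dict Int Int) (t : Int) (L : List (Int × Int)) (acc : Int) :
    pvLoopA m t L acc = none ↔ ∃ p ∈ L, pvFailA m t p := by
  induction L generalizing acc with
  | nil => simp [pvLoopA]
  | cons hd tl ih =>
    obtain ⟨v, f⟩ := hd
    by_cases h : m.contains (t - v) = false ∨ f ≠ m.getD (t - v) 0
    · simp only [pvLoopA, if_pos h]
      constructor
      · intro _; exact ⟨(v, f), List.mem_cons_self, h⟩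
      · intro _; trivial
    · simp only [pvLoopA, if_neg h, ih]
      constructor
      · rintro ⟨p, hp, hfail⟩; exact ⟨p, List.mem_cons_of_mem _ hp, hfail⟩
      · rintro ⟨p, hp, hfail⟩
        rcases List.mem_cons.mp hp with rfl | hp'
        · exact absurd hfail h
        · exact ⟨p, hp', hfail⟩

-- A's loop value when every item passes
lemma pvLoopA_some (m : PySem.Dict Int Int) (t : Int) (L : List (Int × Int)) (acc : Int)
    (h : ∀ p ∈ L, ¬ pvFailA m t p) :
    pvLoopA m t L acc = some (acc + (L.map (fun p => p.1 * (t - p.1) * p.2)).sum) := by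
  induction L generalizing acc with
  | nil => simp [pvLoopA]
  | cons hd tl ih =>
    obtain ⟨v, f⟩ := hd
    have hhd : ¬ ((m.contains (t - v) = false ∨ f ≠ m.getD (t - v) 0)) :=
      h (v, f) (List.mem_cons_self)
    simp only [pvLoopA, if_neg hhd]
    rw [ih _ (fun p hp => h p (List.mem_cons_of_mem _ hp))]
    congr 1
    simp
    ring

-- B's loop characterization over a list of in-range indices
lemma pvLoopB_char (s : List Int) (t : Int) (I : List Int) (acc : Int)
    (hI : ∀ i ∈ I, 0 ≤ i ∧ i < (s.length : Int)) :
    pvLoopB s (s.length : Int) t I acc =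
      if ∀ i ∈ I, s.getD i.toNat 0 + s.getD ((s.length : Int) - 1 - i).toNat 0 = t
      then some (acc + (I.map (fun i =>
             s.getD i.toNat 0 * s.getD ((s.length : Int) - 1 - i).toNat 0)).sum)
      else none := by
  induction I generalizing acc with
  | nil => simp [pvLoopB]
  | cons i tl ih =>
    obtain ⟨h0, h1⟩ := hI i List.mem_cons_self
    have h0' : (0 : Int) ≤ (s.length : Int) - 1 - i := by omega
    have h1' : (s.length : Int) - 1 - i < (s.length : Int) := by omega
    have hx : PySem.List.pyGet? s i = some s[i.toNat] :=
      PySem.List.pyGet?_eq_some_getElem s h0 h1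
    have hy : PySem.List.pyGet? s ((s.length : Int) - 1 - i) =
        some s[((s.length : Int) - 1 - i).toNat] :=
      PySem.List.pyGet?_eq_some_getElem s h0' h1'
    have hgx : s.getD i.toNat 0 = s[i.toNat]'(by omega) := List.getD_eq_getElem s 0 (by omega)
    have hgy : s.getD ((s.length : Int) - 1 - i).toNat 0 =
        s[((s.length : Int) - 1 - i).toNat]'(by omega) := List.getD_eq_getElem s 0 (by omega)
    by_cases hc : s.getD i.toNat 0 + s.getD ((s.length : Int) - 1 - i).toNat 0 = t
    · have : ¬ (s[i.toNat]'(by omega) + s[((s.length : Int) - 1 - i).toNat]'(by omega) ≠ t) := by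
        rw [← hgx, ← hgy]; omega
      simp only [pvLoopB, hx, hy, if_neg this]
      rw [ih _ (fun j hj => hI j (List.mem_cons_of_mem _ hj))]
      by_cases hall : ∀ j ∈ tl, s.getD j.toNat 0 + s.getD ((s.length : Int) - 1 - j).toNat 0 = t
      · rw [if_pos hall, if_pos (by intro j hj; rcases List.mem_cons.mp hj with rfl | hj'
                                    · exact hc
                                    · exact hall j hj')]
        congr 1
        simp only [List.map_cons, List.sum_cons, ← hgx, ← hgy]
        ring
      · rw [if_neg hall, if_neg (by intro hcon; exact hall (fun j hj => hcon j (List.mem_cons_of_mem _ hj)))]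
    · have : s[i.toNat]'(by omega) + s[((s.length : Int) - 1 - i).toNat]'(by omega) ≠ t := by
        rw [← hgx, ← hgy]; exact hc
      simp only [pvLoopB, hx, hy, if_pos this]
      rw [if_neg (by intro hcon; exact hc (hcon i List.mem_cons_self))]

-- sum over a Nodup list of an indicator term
lemma pvSum_ite (g : Int → Int) (x : Int) (S : List Int) (hS : S.Nodup) (hx : x ∈ S) :
    (S.map (fun v => if v = x then g v else 0)).sum = g x := by
  induction S with
  | nil => cases hx
  | cons a S ih =>
    by_cases hax : a = x
    · subst hax
      have hnotin : a ∉ S := (List.nodup_cons.mp hS).1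
      have hz : ∀ v ∈ S, (if v = a then g v else 0) = 0 := by
        intro v hv
        have hne : v ≠ a := fun h => hnotin (h ▸ hv)
        simp [hne]
      simp only [List.map_cons, List.sum_cons]
      rw [List.map_congr_left hz]
      simp
    · have hx' : x ∈ S := by
        rcases List.mem_cons.mp hx with h | h
        · exact absurd h.symm hax
        · exact h
      simp only [List.map_cons, List.sum_cons, if_neg hax]
      rw [ih (List.nodup_cons.mp hS).2 hx']
      ring

-- grouping a sum by distinct values with multiplicities
lemma pvSum_count (g : Int → Int) (S l : List Int) (hS : S.Nodup) (hl : ∀ x ∈ l, x ∈ S) :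
    (S.map (fun v => g v * (List.count v l : Int))).sum = (l.map g).sum := by
  induction l with
  | nil => simp
  | cons x l ih =>
    have hx : x ∈ S := hl x List.mem_cons_self
    have hl' : ∀ y ∈ l, y ∈ S := fun y hy => hl y (List.mem_cons_of_mem _ hy)
    have hsplit : ∀ v ∈ S, g v * (List.count v (x :: l) : Int) =
        g v * (List.count v l : Int) + (if v = x then g v else 0) := by
      intro v _
      rw [List.count_cons]
      by_cases hvx : v = x
      · simp [hvx]; ring
      · have : ¬ ((x == v) = true) := by simp [Ne.symm hvx]
        simp [this, hvx]
    rw [List.map_congr_left hsplit, PySem.List.sum_map_add_int, ih hl', pvSum_ite g x S hS hx]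
    simp [add_comm]

-- the count condition, once it holds on members, holds for every value
lemma pvCond_all {skill : List Int} {t : Int} (hC : pvCond skill t) :
    ∀ v, List.count (t - v) skill = List.count v skill := by
  intro v
  by_cases hv : v ∈ skill
  · exact hC v hv
  · have h0 : List.count v skill = 0 := List.count_eq_zero.mpr hv
    by_cases hw : (t - v) ∈ skill
    · have := hC (t - v) hw
      simp only [sub_sub_cancel] at this
      omega
    · rw [h0, List.count_eq_zero.mpr hw]

-- the mirrored sorted list
lemma pvInj (t : Int) : Function.Injective (fun x : Int => t - x) := by
  intro a b h; simpa using h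

lemma pvCount_mirror (skill : List Int) (t v : Int) :
    List.count v ((PySem.List.sorted skill (fun x => x) false).reverse.map (fun x => t - x)) =
      List.count (t - v) skill := by
  have hv : v = (fun x : Int => t - x) (t - v) := by simp
  rw [hv, List.count_map_of_injective _ _ (pvInj t), List.count_reverse,
    (PySem.List.sorted_perm skill (fun x => x) false).count_eq]
  simp

lemma pvMirror_pairwise (skill : List Int) (t : Int) :
    ((PySem.List.sorted skill (fun x => x) false).reverse.map (fun x => t - x)).Pairwise (· ≤ ·) := by
  rw [List.pairwise_map, List.pairwise_reverse]
  exact (PySem.List.sorted_pairwise skill (fun x => x)).imp (by intro a b h; omega)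

-- Sym ↔ "sorted list equals its mirror"
lemma pvSym_iff_eq_mirror (skill : List Int) (t : Int) :
    pvSym (PySem.List.sorted skill (fun x => x) false) t ↔
      PySem.List.sorted skill (fun x => x) false =
        (PySem.List.sorted skill (fun x => x) false).reverse.map (fun x => t - x) := by
  set s := PySem.List.sorted skill (fun x => x) false with hs
  have hlen : ((s.reverse.map (fun x => t - x))).length = s.length := by simp
  constructor
  · intro hsym
    apply List.ext_getElem (by omega)
    intro i h1 h2
    have hi : i < s.length := h1
    have : (s.reverse.map (fun x => t - x))[i] = t - s[s.length - 1 - i]'(by omega) := by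
      rw [List.getElem_map, List.getElem_reverse]
    rw [this]
    have := hsym i hi
    rw [List.getD_eq_getElem s 0 hi, List.getD_eq_getElem s 0 (by omega)] at this
    omega
  · intro heq j hj
    have h2 : j < (s.reverse.map (fun x => t - x)).length := by omega
    have := congrArg (fun l => l[j]?) heq
    simp only [List.getElem?_eq_getElem hj, List.getElem?_eq_getElem h2] at this
    have hval : s[j] = t - s[s.length - 1 - j]'(by omega) := by
      have h3 : (s.reverse.map (fun x => t - x))[j] = t - s[s.length - 1 - j]'(by omega) := by
        rw [List.getElem_map, List.getElem_reverse]
      rw [← h3]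
      exact Option.some.inj this
    rw [List.getD_eq_getElem s 0 hj, List.getD_eq_getElem s 0 (by omega)]
    omega

-- "equals its mirror" ↔ the count condition
lemma pvEq_mirror_iff_cond (skill : List Int) (t : Int) :
    (PySem.List.sorted skill (fun x => x) false =
        (PySem.List.sorted skill (fun x => x) false).reverse.map (fun x => t - x)) ↔
      pvCond skill t := by
  set s := PySem.List.sorted skill (fun x => x) false with hs
  have hcnt : ∀ v, List.count v s = List.count v skill :=
    (PySem.List.sorted_perm skill (fun x => x) false).count_eq
  constructor
  · intro heq v _
    have := congrArg (List.count v) heq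
    rw [hcnt, pvCount_mirror] at this
    omega
  · intro hC
    have hall := pvCond_all hC
    have hperm : s.Perm (s.reverse.map (fun x => t - x)) := by
      rw [List.perm_iff_count]
      intro v
      rw [hcnt, pvCount_mirror, hall]
    exact List.Perm.eq_of_pairwise (fun a b _ _ hab hba => le_antisymm hab hba)
      (by simpa [hs] using PySem.List.sorted_pairwise skill (fun x => x))
      (pvMirror_pairwise skill t) hperm

-- per-item check of A's loop ↔ count condition at that value
lemma pvItem_iff (skill : List Int) (t v : Int) (hv : v ∈ skill) :
    ¬ pvFailA (PySem.Dict.counter skill) t (v, (List.count v skill : Int)) ↔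
      List.count (t - v) skill = List.count v skill := by
  simp only [pvFailA, PySem.Dict.contains_counter, PySem.Dict.getD_counter]
  constructor
  · intro h
    push Not at h
    have := h.2
    exact_mod_cast this.symm
  · intro h
    push Not
    constructor
    · have hpos : 0 < List.count (t - v) skill := by
        rw [h]; exact List.count_pos_iff.mpr hv
      have hmem : (t - v) ∈ skill := List.count_pos_iff.mp hpos
      simp only [ne_eq, Bool.not_eq_false, List.contains_iff_mem]
      exact hmem
    · exact_mod_cast h.symm

-- A's branch outcome in terms of pvCond
lemma pvA_none_iff (skill : List Int) (t : Int) (acc : Int) :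
    pvLoopA (PySem.Dict.counter skill) t (PySem.Dict.counter skill).items acc = none ↔
      ¬ pvCond skill t := by
  rw [pvLoopA_none_iff, PySem.Dict.items_counter]
  constructor
  · rintro ⟨p, hp, hfail⟩
    obtain ⟨v, hv, rfl⟩ := List.mem_map.mp hp
    have hv' : v ∈ skill := (PySem.Set.mem_ofList skill v).mp hv
    intro hC
    exact ((pvItem_iff skill t v hv').mpr (hC v hv')) hfail
  · intro hC
    simp only [pvCond, not_forall] at hC
    obtain ⟨v, hv, hne⟩ := hC
    refine ⟨(v, (List.count v skill : Int)), ?_, ?_⟩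
    · exact List.mem_map.mpr ⟨v, (PySem.Set.mem_ofList skill v).mpr hv, rfl⟩
    · by_contra hok
      exact hne ((pvItem_iff skill t v hv).mp hok)

lemma pvA_some (skill : List Int) (t : Int) (hC : pvCond skill t) :
    pvLoopA (PySem.Dict.counter skill) t (PySem.Dict.counter skill).items 0 =
      some ((skill.map (fun x => x * (t - x))).sum) := by
  rw [pvLoopA_some]
  · congr 1
    rw [PySem.Dict.items_counter, List.map_map]
    have : ((fun p : Int × Int => p.1 * (t - p.1) * p.2) ∘ fun k => (k, (List.count k skill : Int)))
        = fun v => (v * (t - v)) * (List.count v skill : Int) := by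
      funext v; simp
    rw [this, pvSum_count (fun v => v * (t - v)) _ skill (PySem.Set.nodup_ofList skill)
      (fun x hx => (PySem.Set.mem_ofList skill x).mpr hx)]
    simp
  · intro p hp
    rw [PySem.Dict.items_counter] at hp
    obtain ⟨v, hv, rfl⟩ := List.mem_map.mp hp
    have hv' : v ∈ skill := (PySem.Set.mem_ofList skill v).mp hv
    exact (pvItem_iff skill t v hv').mpr (hC v hv')

-- B's range condition ↔ pvSym of the sorted list
lemma pvB_cond_iff (s : List Int) (t : Int) :
    (∀ i ∈ PySem.List.pyRange 0 (s.length : Int) 1,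
        s.getD i.toNat 0 + s.getD ((s.length : Int) - 1 - i).toNat 0 = t) ↔ pvSym s t := by
  constructor
  · intro h j hj
    have := h (j : Int) (PySem.List.mem_pyRange_one.mpr (by omega))
    have h1 : ((j : Int)).toNat = j := by omega
    have h2 : ((s.length : Int) - 1 - (j : Int)).toNat = s.length - 1 - j := by omega
    rwa [h1, h2] at this
  · intro h i hi
    have hi' := PySem.List.mem_pyRange_one.mp hi
    have h2 : ((s.length : Int) - 1 - i).toNat = s.length - 1 - i.toNat := by omega
    rw [h2]
    exact h i.toNat (by omega)

-- B's accumulated sum under pvSym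
lemma pvB_sum (s : List Int) (t : Int) (hsym : pvSym s t) :
    ((PySem.List.pyRange 0 (s.length : Int) 1).map (fun i =>
        s.getD i.toNat 0 * s.getD ((s.length : Int) - 1 - i).toNat 0)).sum =
      (s.map (fun x => x * (t - x))).sum := by
  have hstep : ∀ i ∈ PySem.List.pyRange 0 (s.length : Int) 1,
      s.getD i.toNat 0 * s.getD ((s.length : Int) - 1 - i).toNat 0 =
        (fun x => x * (t - x)) (PySem.List.pyGetD s i 0) := by
    intro i hi
    have hi' := PySem.List.mem_pyRange_one.mp hi
    have hmirror := (pvB_cond_iff s t).mpr hsym i hi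
    have hg : PySem.List.pyGetD s i 0 = s.getD i.toNat 0 := by
      rw [PySem.List.pyGetD_eq_getElem s 0 hi'.1 hi'.2, List.getD_eq_getElem s 0 (by omega)]
    rw [hg]
    have hb : s.getD ((s.length : Int) - 1 - i).toNat 0 = t - s.getD i.toNat 0 := by omega
    rw [hb]
  rw [List.map_congr_left hstep]
  have : (PySem.List.pyRange 0 (s.length : Int) 1).map
      (fun i => (fun x => x * (t - x)) (PySem.List.pyGetD s i 0)) =
      ((PySem.List.pyRange 0 (s.length : Int) 1).map (fun i => PySem.List.pyGetD s i 0)).map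
        (fun x => x * (t - x)) := by
    rw [List.map_map]; rfl
  rw [this, PySem.List.map_pyGetD_pyRange_zero']

-- main glue
theorem pv_main (skill : List Int) : dividePlayers skill = dividePlayers_alt skill := by
  simp only [dividePlayers, dividePlayers_alt]
  by_cases hmod : PySem.Int.mod skill.sum ((skill.length / 2 : Nat) : Int) ≠ 0
  · rw [if_pos hmod, if_pos hmod]
  · rw [if_neg hmod, if_neg hmod]
    set t := PySem.Int.floordiv skill.sum ((skill.length / 2 : Nat) : Int) with ht
    set s := PySem.List.sorted skill (fun x => x) false with hs
    have hlen : s.length = skill.length := PySem.List.length_sorted skill _ false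
    have hcast : (skill.length : Int) = (s.length : Int) := by rw [hlen]
    have hcond : pvSym s t ↔ pvCond skill t :=
      (pvSym_iff_eq_mirror skill t).trans (pvEq_mirror_iff_cond skill t)
    rw [hcast]
    rw [pvLoopB_char s t _ 0 (fun i hi => PySem.List.mem_pyRange_one.mp hi)]
    by_cases hC : pvCond skill t
    · rw [pvA_some skill t hC]
      have hsym : pvSym s t := hcond.mpr hC
      rw [if_pos ((pvB_cond_iff s t).mpr hsym), pvB_sum s t hsym]
      have hperm : (s.map (fun x => x * (t - x))).sum = (skill.map (fun x => x * (t - x))).sum :=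
        ((PySem.List.sorted_perm skill (fun x => x) false).map _).sum_eq
      rw [hperm]
      simp
    · rw [(pvA_none_iff skill t 0).mpr hC]
      rw [if_neg (fun hall => hC (hcond.mp ((pvB_cond_iff s t).mp hall)))]

-- ===== VERDICT (by name: the statement is the Claim_ definition above) =====
theorem dividePlayers_spec : Claim_equal_dividePlayers := by
  intro skill _ _
  unfold Spec_dividePlayers
  exact pv_main skill
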